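-- pv_equiv track=rewrite | github.com/dwurtz/lighthouse | src/deja/goals.py | _render_sections
-- ===== SOURCE A (Python) =====
-- _SECTION_ORDER = [
--     "Standing context",
--     "Automations",
--     "Tasks",
--     "Waiting for",
--     "Reminders",
--     "Archive",
-- ]
--
-- def _render_sections(
--     preamble: list[str], sections: dict[str, list[str]]
-- ) -> str:
--     """Reassemble preamble + sections into goals.md text.
--
--     Sections listed in ``_SECTION_ORDER`` come in that order; any
--     unknown sections (e.g. user-added ``## Notes``) come last in the
--     order the parser first encountered them.
--     """
--     out: list[str] = list(preamble)
--     if out and out[-1] != "":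
--         out.append("")
--
--     seen: set[str] = set()
--     for name in _SECTION_ORDER:
--         if name in sections:
--             out.append(f"## {name}")
--             out.extend(sections[name])
--             seen.add(name)
--     for name, lines in sections.items():
--         if name in seen:
--             continue
--         out.append(f"## {name}")
--         out.extend(lines)
--
--     return "\n".join(out).rstrip() + "\n"
-- ===== SOURCE B (Python) =====
-- _SECTION_ORDER = [
--     "Standing context",
--     "Automations",
--     "Tasks",
--     "Waiting for",
--     "Reminders",
--     "Archive",
-- ]
--
--
-- def _sort_key(name):
--     return (
--         _SECTION_ORDER.index(name)
--         if name in _SECTION_ORDER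
--         else len(_SECTION_ORDER)
--     )
--
--
-- def _render_sections(
--     preamble: list[str], sections: dict[str, list[str]]
-- ) -> str:
--     """Reassemble preamble + sections into goals.md text.
--
--     One stable sort of the section names puts known sections in
--     canonical order and unknown ones after them in insertion order;
--     a single loop then emits everything (no ``seen`` set, no second
--     scan).
--     """
--     out: list[str] = list(preamble)
--     if out and out[-1] != "":
--         out.append("")
--
--     for name in sorted(sections, key=_sort_key):
--         out.append(f"## {name}")
--         out.extend(sections[name])
--
--     return "\n".join(out).rstrip() + "\n"
-- ===== Notes on version B (the rewrite author's own statement) =====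
-- stated objective: simpler
-- what changed: Replaces A's two emission scans with a seen-set by one stable sort of the section names (known names keyed by their canonical index, unknown names by len(_SECTION_ORDER), so stability keeps their insertion order) followed by a single emission loop.
import Mathlib
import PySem

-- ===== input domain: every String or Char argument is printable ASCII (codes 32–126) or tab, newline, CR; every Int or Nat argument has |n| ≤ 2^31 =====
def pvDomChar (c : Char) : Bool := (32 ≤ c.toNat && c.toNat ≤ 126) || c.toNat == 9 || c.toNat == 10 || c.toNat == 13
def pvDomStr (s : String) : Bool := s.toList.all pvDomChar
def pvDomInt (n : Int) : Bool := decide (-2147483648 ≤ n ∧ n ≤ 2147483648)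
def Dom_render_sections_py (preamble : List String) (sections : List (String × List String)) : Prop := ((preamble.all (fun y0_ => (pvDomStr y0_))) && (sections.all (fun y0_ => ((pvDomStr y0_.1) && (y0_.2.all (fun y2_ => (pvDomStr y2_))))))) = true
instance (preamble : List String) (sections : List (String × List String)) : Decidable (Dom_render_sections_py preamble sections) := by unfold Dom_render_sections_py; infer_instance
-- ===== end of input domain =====

-- B replaces A's two emission scans + seen-set with one stable sort of the section
-- names by canonical index (fallback: list length) and a single emission loop (simpler).


-- ===== PORT A =====
def pvSectionOrder : List String :=
  ["Standing context", "Automations", "Tasks", "Waiting for", "Reminders", "Archive"]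

def render_sections_py (preamble : List String) (sections : List (String × List String)) : String :=
  let d : PySem.Dict String (List String) := PySem.Dict.ofList sections
  -- out = list(preamble); if out and out[-1] != "": out.append("")
  let out1 : List String :=
    if preamble ≠ [] ∧ preamble.getLastD "" ≠ "" then preamble ++ [""] else preamble
  -- first loop: for name in _SECTION_ORDER: if name in sections: append header, extend, add to seen
  let st : List String × PySem.Set String :=
    pvSectionOrder.foldl
      (fun st name =>
        if d.contains name then
          (st.1 ++ ["## " ++ name] ++ d.getD name [], PySem.Set.add st.2 name)
        else st)
      (out1, PySem.Set.empty)
  -- second loop: for name, lines in sections.items(): skip if in seen, else emit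
  let out2 : List String :=
    d.items.foldl
      (fun acc kv =>
        if PySem.Set.contains st.2 kv.1 then acc
        else acc ++ ["## " ++ kv.1] ++ kv.2)
      st.1
  PySem.Str.rstrip (PySem.Str.join "\n" out2) ++ "\n"

-- ===== PORT B =====
-- _SECTION_ORDER.index(name) if name in _SECTION_ORDER else len(_SECTION_ORDER)
-- (exact: PySem.List.index? is some exactly when name is a member)
def pvSortKey (name : String) : Nat :=
  match PySem.List.index? pvSectionOrder name with
  | some i => i
  | none => pvSectionOrder.length

def render_sections_py_alt (preamble : List String) (sections : List (String × List String)) : String :=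
  let d : PySem.Dict String (List String) := PySem.Dict.ofList sections
  let out1 : List String :=
    if preamble ≠ [] ∧ preamble.getLastD "" ≠ "" then preamble ++ [""] else preamble
  -- for name in sorted(sections, key=_sort_key): append header, extend
  let ordered : List String := PySem.List.sorted d.keys pvSortKey
  let out2 : List String :=
    ordered.foldl (fun acc name => acc ++ ["## " ++ name] ++ d.getD name []) out1
  PySem.Str.rstrip (PySem.Str.join "\n" out2) ++ "\n"

-- ===== PRECONDITION & SPEC =====
def Spec_render_sections_py (preamble : List String) (sections : List (String × List String)) (out : String) : Prop := out = render_sections_py_alt preamble sections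
instance (preamble : List String) (sections : List (String × List String)) (out : String) : Decidable (Spec_render_sections_py preamble sections out) := by unfold Spec_render_sections_py; infer_instance

-- ===== CLAIM (what is proved, stated in full; the proofs are below) =====
def Claim_equal_render_sections_py : Prop := ∀ (preamble : List String) (sections : List (String × List String)), Dom_render_sections_py preamble sections → Spec_render_sections_py preamble sections (render_sections_py preamble sections)

-- ===== LEMMAS AND PROOFS =====

-- the per-section emitted segment
def pvSeg (d : PySem.Dict String (List String)) (n : String) : List String :=
  ("## " ++ n) :: d.getD n []

-- A's first loop, characterised: emits the contained known names in order, seen collects them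
theorem pvFoldA (d : PySem.Dict String (List String)) (names : List String)
    (acc : List String) (s : PySem.Set String) :
    names.foldl
      (fun st name =>
        if d.contains name then
          (st.1 ++ ["## " ++ name] ++ d.getD name [], PySem.Set.add st.2 name)
        else st)
      (acc, s)
    = (acc ++ (names.filter (fun n => d.contains n)).flatMap (pvSeg d),
       PySem.Set.update s (names.filter (fun n => d.contains n))) := by
  induction names generalizing acc s with
  | nil => simp [PySem.Set.update]
  | cons n ns ih =>
    rw [List.foldl_cons]
    simp only []
    by_cases h : d.contains n
    · rw [if_pos h, ih]
      simp [h, pvSeg, PySem.Set.update, List.append_assoc]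
    · rw [if_neg h, ih]
      simp [h]

-- A's second loop, characterised
theorem pvFoldSkip (p : String × List String → Bool) (l : List (String × List String))
    (acc : List String) :
    l.foldl (fun acc kv => if p kv then acc else acc ++ ["## " ++ kv.1] ++ kv.2) acc
    = acc ++ (l.filter (fun kv => !p kv)).flatMap (fun kv => ("## " ++ kv.1) :: kv.2) := by
  induction l generalizing acc with
  | nil => simp
  | cons x xs ih =>
    rw [List.foldl_cons]
    by_cases h : p x
    · rw [if_pos h, ih]
      simp [h]
    · rw [if_neg h, ih]
      simp [h, List.append_assoc]

-- B's emission loop, characterised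
theorem pvFoldEmit (d : PySem.Dict String (List String)) (l : List String) (acc : List String) :
    l.foldl (fun acc name => acc ++ ["## " ++ name] ++ d.getD name []) acc
    = acc ++ l.flatMap (pvSeg d) := by
  induction l generalizing acc with
  | nil => simp
  | cons n ns ih =>
    simp only [List.foldl_cons]
    rw [ih]
    simp [pvSeg, List.append_assoc]

-- closed form of the sort key
theorem pvSortKey_eq (n : String) :
    pvSortKey n =
      if n = "Standing context" then 0
      else if n = "Automations" then 1
      else if n = "Tasks" then 2
      else if n = "Waiting for" then 3
      else if n = "Reminders" then 4
      else if n = "Archive" then 5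
      else 6 := by
  by_cases h0 : n = "Standing context"; · subst h0; decide
  by_cases h1 : n = "Automations"; · subst h1; decide
  by_cases h2 : n = "Tasks"; · subst h2; decide
  by_cases h3 : n = "Waiting for"; · subst h3; decide
  by_cases h4 : n = "Reminders"; · subst h4; decide
  by_cases h5 : n = "Archive"; · subst h5; decide
  have hnone : List.idxOf? n pvSectionOrder = none := by
    rw [List.idxOf?_eq_none_iff]
    simp only [pvSectionOrder, List.mem_cons, List.not_mem_nil, or_false, not_or]
    exact ⟨h0, h1, h2, h3, h4, h5⟩
  simp [pvSortKey, PySem.List.index?, hnone, h0, h1, h2, h3, h4, h5]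
  rfl

-- insertBy walks past a prefix it is not before
theorem pvInsertBy_skip {α : Type} (before : α → α → Bool) (x : α) (P S : List α)
    (h : ∀ y ∈ P, before x y = false) :
    PySem.List.insertBy before x (P ++ S) = P ++ PySem.List.insertBy before x S := by
  induction P with
  | nil => simp
  | cons p ps ih =>
    have hp : before x p = false := h p (by simp)
    simp [PySem.List.insertBy, hp]
    exact ih (fun y hy => h y (by simp [hy]))

-- insertBy goes to the front of a block it is before
theorem pvInsertBy_front {α : Type} (before : α → α → Bool) (x : α) (S : List α)
    (h : ∀ y ∈ S, before x y = true) :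
    PySem.List.insertBy before x S = x :: S := by
  cases S with
  | nil => simp [PySem.List.insertBy]
  | cons s ss => simp [PySem.List.insertBy, h s (by simp)]

-- inserting into a bucketed list appends to the right bucket
theorem pvBucket_insert {α : Type} (key : α → Nat) (rng : List Nat) (x : α) (l : List α)
    (hs : rng.Pairwise (· < ·)) (hmem : key x ∈ rng) :
    PySem.List.insertBy (fun a b => decide (key a < key b)) x
        (rng.flatMap (fun i => l.filter (fun n => key n = i)))
    = rng.flatMap (fun i => (l ++ [x]).filter (fun n => key n = i)) := by
  induction rng with
  | nil => simp at hmem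
  | cons r rs ih =>
    have hrs : ∀ i ∈ rs, r < i := (List.pairwise_cons.mp hs).1
    have hs' := (List.pairwise_cons.mp hs).2
    by_cases hx : key x = r
    · -- x lands at the end of bucket r
      rw [List.flatMap_cons,
        pvInsertBy_skip _ x _ _ (by
          intro y hy
          simp only [List.mem_filter, decide_eq_true_eq] at hy
          simp only [decide_eq_false_iff_not, hx, hy.2]
          omega),
        pvInsertBy_front _ x _ (by
          intro y hy
          simp only [List.mem_flatMap, List.mem_filter, decide_eq_true_eq] at hy
          obtain ⟨i, hi, -, hkey⟩ := hy
          have hri := hrs i hi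
          simp only [decide_eq_true_eq, hx, hkey]
          omega)]
      rw [List.flatMap_cons]
      have h1 : (l ++ [x]).filter (fun n => key n = r) = l.filter (fun n => key n = r) ++ [x] := by
        simp [List.filter_append, hx]
      have h2 : rs.flatMap (fun i => (l ++ [x]).filter (fun n => key n = i))
          = rs.flatMap (fun i => l.filter (fun n => key n = i)) := by
        apply List.flatMap_congr
        intro i hi
        have : key x ≠ i := by have := hrs i hi; omega
        simp [List.filter_append, this]
      rw [h1, h2]; simp
    · -- x belongs to a later bucket
      have hmem' : key x ∈ rs := by
        rcases List.mem_cons.mp hmem with h | h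
        · exact absurd h hx
        · exact h
      rw [List.flatMap_cons,
        pvInsertBy_skip _ x _ _ (by
          intro y hy
          simp only [List.mem_filter, decide_eq_true_eq] at hy
          have hrx : r < key x := hrs _ hmem'
          have hyr : key y = r := hy.2
          simp only [decide_eq_false_iff_not]
          omega),
        ih hs' hmem']
      rw [List.flatMap_cons]
      have h1 : (l ++ [x]).filter (fun n => key n = r) = l.filter (fun n => key n = r) := by
        have : key x ≠ r := hx
        simp [List.filter_append, this]
      rw [h1]

-- the stable sort of a list whose keys all lie in rng is the concatenation of its buckets
theorem pvSorted_buckets {α : Type} (key : α → Nat) (rng : List Nat) (l : List α)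
    (hs : rng.Pairwise (· < ·)) (hk : ∀ x ∈ l, key x ∈ rng) :
    PySem.List.sorted l key = rng.flatMap (fun i => l.filter (fun n => key n = i)) := by
  rw [PySem.List.sorted_eq_foldl_insertBy]
  induction l using List.reverseRecOn with
  | nil => simp
  | append_singleton l x ih =>
    rw [List.foldl_append, List.foldl_cons, List.foldl_nil,
      ih (fun y hy => hk y (by simp [hy])),
      pvBucket_insert key rng x l hs (hk x (by simp))]

-- a nodup list filtered to one value
theorem pvFilter_single (ks : List String) (hnd : ks.Nodup) (m : String) :
    ks.filter (fun n => n = m) = if m ∈ ks then [m] else [] := by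
  have : ks.filter (fun n => n = m) = ks.filter (fun n => n == m) := by
    apply List.filter_congr; intro a _
    by_cases h : a = m <;> simp [h]
  rw [this, List.filter_beq]
  by_cases h : m ∈ ks
  · rw [List.count_eq_one_of_mem hnd h, if_pos h]; rfl
  · rw [List.count_eq_zero_of_not_mem h, if_neg h]; rfl

-- main list-level equality: B's sorted order = A's known-then-unknown order
theorem pvOrder_eq (d : PySem.Dict String (List String)) (hnd : d.keys.Nodup) :
    PySem.List.sorted d.keys pvSortKey
    = pvSectionOrder.filter (fun n => d.contains n)
      ++ d.keys.filter (fun n => !pvSectionOrder.contains n) := by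
  have hk : ∀ x ∈ d.keys, pvSortKey x ∈ [0, 1, 2, 3, 4, 5, 6] := by
    intro x _
    rw [pvSortKey_eq]
    split_ifs <;> decide
  rw [pvSorted_buckets pvSortKey [0, 1, 2, 3, 4, 5, 6] d.keys (by decide) hk]
  have fil : ∀ (i : Nat) (m : String),
      (∀ n, (pvSortKey n = i) ↔ n = m) →
      d.keys.filter (fun n => pvSortKey n = i) = if m ∈ d.keys then [m] else [] := by
    intro i m hiff
    rw [show d.keys.filter (fun n => pvSortKey n = i) = d.keys.filter (fun n => n = m) from
      List.filter_congr (fun a _ => by simp [hiff a])]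
    exact pvFilter_single d.keys hnd m
  have key_iff : ∀ (n : String),
      (pvSortKey n = 0 ↔ n = "Standing context") ∧
      (pvSortKey n = 1 ↔ n = "Automations") ∧
      (pvSortKey n = 2 ↔ n = "Tasks") ∧
      (pvSortKey n = 3 ↔ n = "Waiting for") ∧
      (pvSortKey n = 4 ↔ n = "Reminders") ∧
      (pvSortKey n = 5 ↔ n = "Archive") ∧
      (pvSortKey n = 6 ↔ ¬ n ∈ pvSectionOrder) := by
    intro n
    rw [pvSortKey_eq]
    split_ifs with h0 h1 h2 h3 h4 h5 <;> simp_all [pvSectionOrder]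
  have h0 := fil 0 "Standing context" (fun n => (key_iff n).1)
  have h1 := fil 1 "Automations" (fun n => (key_iff n).2.1)
  have h2 := fil 2 "Tasks" (fun n => (key_iff n).2.2.1)
  have h3 := fil 3 "Waiting for" (fun n => (key_iff n).2.2.2.1)
  have h4 := fil 4 "Reminders" (fun n => (key_iff n).2.2.2.2.1)
  have h5 := fil 5 "Archive" (fun n => (key_iff n).2.2.2.2.2.1)
  have h6 : d.keys.filter (fun n => pvSortKey n = 6)
      = d.keys.filter (fun n => !pvSectionOrder.contains n) := by
    apply List.filter_congr
    intro a _
    have := (key_iff a).2.2.2.2.2.2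
    simp only [List.contains_eq_mem] at *
    by_cases h : a ∈ pvSectionOrder <;> simp_all
  have hcont : ∀ m, d.contains m = decide (m ∈ d.keys) := by
    intro m
    by_cases h : m ∈ d.keys
    · simp [h, (PySem.Dict.contains_iff_mem_keys d m).mpr h]
    · simp only [h, decide_false]
      by_contra hc
      simp only [Bool.not_eq_false] at hc
      exact h ((PySem.Dict.contains_iff_mem_keys d m).mp hc)
  simp only [List.flatMap_cons, List.flatMap_nil, List.append_nil, h0, h1, h2, h3, h4, h5, h6]
  simp only [pvSectionOrder, List.filter_cons, List.filter_nil, hcont]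
  by_cases m0 : "Standing context" ∈ d.keys <;>
  by_cases m1 : "Automations" ∈ d.keys <;>
  by_cases m2 : "Tasks" ∈ d.keys <;>
  by_cases m3 : "Waiting for" ∈ d.keys <;>
  by_cases m4 : "Reminders" ∈ d.keys <;>
  by_cases m5 : "Archive" ∈ d.keys <;>
    simp [m0, m1, m2, m3, m4, m5]

-- ===== VERDICT =====
theorem render_sections_py_spec : Claim_equal_render_sections_py := by
  intro preamble sections _
  unfold Spec_render_sections_py render_sections_py render_sections_py_alt
  simp only []
  set d : PySem.Dict String (List String) := PySem.Dict.ofList sections with hd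
  have hnd : d.keys.Nodup := PySem.Dict.nodup_keys_ofList sections
  set out1 : List String :=
    if preamble ≠ [] ∧ preamble.getLastD "" ≠ "" then preamble ++ [""] else preamble with hout1
  -- A side
  rw [pvFoldA d pvSectionOrder out1 PySem.Set.empty]
  set known : List String := pvSectionOrder.filter (fun n => d.contains n) with hknown
  rw [pvFoldSkip (fun kv => PySem.Set.contains (PySem.Set.update PySem.Set.empty known) kv.1)
      d.items]
  -- B side
  rw [pvFoldEmit d (PySem.List.sorted d.keys pvSortKey) out1, pvOrder_eq d hnd]
  -- reduce the A-side items loop to a keys loop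
  have hitems : d.items = d.keys.map (fun k => (k, d.getD k [])) :=
    PySem.Dict.items_eq_map_keys d hnd []
  have hseen : ∀ k ∈ d.keys,
      (!PySem.Set.contains (PySem.Set.update PySem.Set.empty known) k)
      = (!pvSectionOrder.contains k) := by
    intro k hk
    have hmem : (k ∈ PySem.Set.update PySem.Set.empty known) ↔ k ∈ pvSectionOrder := by
      rw [PySem.Set.mem_update]
      constructor
      · rintro (hc | hc)
        · simp [PySem.Set.empty] at hc
        · rw [hknown] at hc
          exact (List.mem_filter.mp hc).1
      · intro h
        refine Or.inr ?_
        rw [hknown]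
        exact List.mem_filter.mpr ⟨h, (PySem.Dict.contains_iff_mem_keys d k).mpr hk⟩
    have heq : PySem.Set.contains (PySem.Set.update PySem.Set.empty known) k
        = pvSectionOrder.contains k := by
      by_cases hp : k ∈ pvSectionOrder
      · have h1 : PySem.Set.contains (PySem.Set.update PySem.Set.empty known) k = true :=
          (PySem.Set.contains_iff _ _).mpr (hmem.mpr hp)
        rw [h1, List.contains_eq_mem]
        simp [hp]
      · have h1 : PySem.Set.contains (PySem.Set.update PySem.Set.empty known) k = false := by
          by_contra hc
          simp only [Bool.not_eq_false] at hc
          exact hp (hmem.mp ((PySem.Set.contains_iff _ _).mp hc))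
        rw [h1, List.contains_eq_mem]
        simp [hp]
    rw [heq]
  have hA2 : (d.items.filter
        (fun kv => !PySem.Set.contains (PySem.Set.update PySem.Set.empty known) kv.1)).flatMap
        (fun kv => ("## " ++ kv.1) :: kv.2)
      = (d.keys.filter (fun n => !pvSectionOrder.contains n)).flatMap (pvSeg d) := by
    rw [hitems, List.filter_map, List.flatMap_map]
    have : d.keys.filter
        ((fun kv => !PySem.Set.contains (PySem.Set.update PySem.Set.empty known) kv.1) ∘
          (fun k => (k, d.getD k [])))
        = d.keys.filter (fun n => !pvSectionOrder.contains n) :=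
      List.filter_congr (fun a ha => hseen a ha)
    rw [this]
    apply List.flatMap_congr
    intro k _
    simp [pvSeg]
  rw [hA2, List.flatMap_append]
  simp only [List.append_assoc]
  rw [hknown]
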